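-- pv_equiv track=rewrite | github.com/priyankmistry21699-web/Forgemind | apps/api/app/services/connector_service.py | recommend_connectors
-- ===== SOURCE A (Python) =====
-- from typing import Any
--
-- STACK_CONNECTOR_MAP: dict[str, list[dict[str, str]]] = {
--     "github": [{"slug": "github", "priority": "required", "reason": "Source code hosting and collaboration"}],
--     "git": [{"slug": "github", "priority": "required", "reason": "Version control system integration"}],
--     "docker": [{"slug": "docker", "priority": "required", "reason": "Containerized deployment"}],
--     "kubernetes": [{"slug": "docker", "priority": "required", "reason": "Container orchestration requires Docker"}],
--     "postgres": [{"slug": "postgresql", "priority": "required", "reason": "Primary database"}],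
--     "postgresql": [{"slug": "postgresql", "priority": "required", "reason": "Primary database"}],
--     "redis": [{"slug": "redis", "priority": "recommended", "reason": "Caching and message broker"}],
--     "s3": [{"slug": "object-storage", "priority": "recommended", "reason": "Object/file storage"}],
--     "minio": [{"slug": "object-storage", "priority": "recommended", "reason": "Local object storage"}],
--     "slack": [{"slug": "slack", "priority": "optional", "reason": "Team notifications"}],
--     "jira": [{"slug": "jira", "priority": "optional", "reason": "Issue tracking integration"}],
--     "api": [{"slug": "github", "priority": "recommended", "reason": "API projects benefit from CI/CD"}],
--     "web": [{"slug": "docker", "priority": "recommended", "reason": "Web apps benefit from containerized deployment"}],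
--     "microservice": [
--         {"slug": "docker", "priority": "required", "reason": "Microservices require containerization"},
--         {"slug": "redis", "priority": "recommended", "reason": "Inter-service communication"},
--     ],
-- }
--
-- def recommend_connectors(
--     recommended_stack: dict[str, str] | None,
--     project_description: str | None,
-- ) -> list[dict[str, Any]]:
--     """Recommend connectors based on project stack and description.
--
--     Returns a deduplicated list of recommendations with priority and reason.
--     """
--     search_text = ""
--     if recommended_stack:
--         if isinstance(recommended_stack, dict):
--             search_text += " ".join(recommended_stack.values()).lower()
--         elif isinstance(recommended_stack, list):
--             search_text += " ".join(str(v) for v in recommended_stack).lower()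
--     if project_description:
--         search_text += " " + project_description.lower()
--
--     seen_slugs: set[str] = set()
--     recommendations: list[dict[str, Any]] = []
--
--     for keyword, recs in STACK_CONNECTOR_MAP.items():
--         if keyword in search_text:
--             for rec in recs:
--                 if rec["slug"] not in seen_slugs:
--                     seen_slugs.add(rec["slug"])
--                     recommendations.append(rec)
--
--     # Sort: required > recommended > optional
--     priority_order = {"required": 0, "recommended": 1, "optional": 2}
--     recommendations.sort(key=lambda r: priority_order.get(r["priority"], 3))
--
--     return recommendations
-- ===== SOURCE B (Python) =====
-- from typing import Any
--
-- STACK_CONNECTOR_MAP: dict[str, list[dict[str, str]]] = {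
--     "github": [{"slug": "github", "priority": "required", "reason": "Source code hosting and collaboration"}],
--     "git": [{"slug": "github", "priority": "required", "reason": "Version control system integration"}],
--     "docker": [{"slug": "docker", "priority": "required", "reason": "Containerized deployment"}],
--     "kubernetes": [{"slug": "docker", "priority": "required", "reason": "Container orchestration requires Docker"}],
--     "postgres": [{"slug": "postgresql", "priority": "required", "reason": "Primary database"}],
--     "postgresql": [{"slug": "postgresql", "priority": "required", "reason": "Primary database"}],
--     "redis": [{"slug": "redis", "priority": "recommended", "reason": "Caching and message broker"}],
--     "s3": [{"slug": "object-storage", "priority": "recommended", "reason": "Object/file storage"}],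
--     "minio": [{"slug": "object-storage", "priority": "recommended", "reason": "Local object storage"}],
--     "slack": [{"slug": "slack", "priority": "optional", "reason": "Team notifications"}],
--     "jira": [{"slug": "jira", "priority": "optional", "reason": "Issue tracking integration"}],
--     "api": [{"slug": "github", "priority": "recommended", "reason": "API projects benefit from CI/CD"}],
--     "web": [{"slug": "docker", "priority": "recommended", "reason": "Web apps benefit from containerized deployment"}],
--     "microservice": [
--         {"slug": "docker", "priority": "required", "reason": "Microservices require containerization"},
--         {"slug": "redis", "priority": "recommended", "reason": "Inter-service communication"},
--     ],
-- }
--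
-- def recommend_connectors(
--     recommended_stack: dict[str, str] | None,
--     project_description: str | None,
-- ) -> list[dict[str, Any]]:
--     """Recommend connectors: bucket by priority during one pass, no trailing sort."""
--     search_text = ""
--     if recommended_stack:
--         if isinstance(recommended_stack, dict):
--             search_text += " ".join(recommended_stack.values()).lower()
--         elif isinstance(recommended_stack, list):
--             search_text += " ".join(str(v) for v in recommended_stack).lower()
--     if project_description:
--         search_text += " " + project_description.lower()
--
--     seen_slugs: set[str] = set()
--     required: list[dict[str, Any]] = []
--     recommended: list[dict[str, Any]] = []
--     optional: list[dict[str, Any]] = []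
--     buckets = {"required": required, "recommended": recommended, "optional": optional}
--
--     for keyword, recs in STACK_CONNECTOR_MAP.items():
--         if keyword in search_text:
--             for rec in recs:
--                 if rec["slug"] not in seen_slugs:
--                     seen_slugs.add(rec["slug"])
--                     buckets[rec["priority"]].append(rec)
--
--     # required > recommended > optional, insertion order kept inside each bucket
--     return required + recommended + optional
-- ===== Notes on version B (the rewrite author's own statement) =====
-- stated objective: simpler
-- what changed: The trailing comparison sort by priority is removed: recommendations are partitioned into three ordered buckets (required/recommended/optional) during the single dedup pass and the buckets are concatenated, which reproduces the stable-sorted order.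
import Mathlib
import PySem

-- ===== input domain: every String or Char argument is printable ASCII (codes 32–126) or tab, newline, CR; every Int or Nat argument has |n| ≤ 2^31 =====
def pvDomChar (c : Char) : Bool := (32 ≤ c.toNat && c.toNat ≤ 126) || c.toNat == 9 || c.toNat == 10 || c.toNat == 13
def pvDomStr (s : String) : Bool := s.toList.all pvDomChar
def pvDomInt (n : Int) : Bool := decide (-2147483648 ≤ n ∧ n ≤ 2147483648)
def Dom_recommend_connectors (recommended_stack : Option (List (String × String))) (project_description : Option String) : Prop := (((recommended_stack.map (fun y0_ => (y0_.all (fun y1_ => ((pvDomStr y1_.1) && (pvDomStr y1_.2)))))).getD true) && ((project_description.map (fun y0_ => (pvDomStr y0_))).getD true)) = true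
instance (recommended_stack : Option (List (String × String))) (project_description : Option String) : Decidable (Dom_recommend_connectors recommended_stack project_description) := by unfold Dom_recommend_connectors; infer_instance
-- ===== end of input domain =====

-- B replaces A's trailing stable sort by priority with a 3-way bucket partition filled during
-- the single dedup pass (objective: simpler — no comparison sort).

-- ===== PORT A =====
-- Module-level constant STACK_CONNECTOR_MAP, shared by both Pythons (a rec dict is an assoc list).
def pvRec (s p r : String) : List (String × String) :=
  [("slug", s), ("priority", p), ("reason", r)]

def pvStackConnectorMap : List (String × List (List (String × String))) :=
  [("github", [pvRec "github" "required" "Source code hosting and collaboration"]),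
   ("git", [pvRec "github" "required" "Version control system integration"]),
   ("docker", [pvRec "docker" "required" "Containerized deployment"]),
   ("kubernetes", [pvRec "docker" "required" "Container orchestration requires Docker"]),
   ("postgres", [pvRec "postgresql" "required" "Primary database"]),
   ("postgresql", [pvRec "postgresql" "required" "Primary database"]),
   ("redis", [pvRec "redis" "recommended" "Caching and message broker"]),
   ("s3", [pvRec "object-storage" "recommended" "Object/file storage"]),
   ("minio", [pvRec "object-storage" "recommended" "Local object storage"]),
   ("slack", [pvRec "slack" "optional" "Team notifications"]),
   ("jira", [pvRec "jira" "optional" "Issue tracking integration"]),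
   ("api", [pvRec "github" "recommended" "API projects benefit from CI/CD"]),
   ("web", [pvRec "docker" "recommended" "Web apps benefit from containerized deployment"]),
   ("microservice", [pvRec "docker" "required" "Microservices require containerization",
                     pvRec "redis" "recommended" "Inter-service communication"])]

-- rec[k]; every rec of the constant map carries the key, so the "" default is never reached.
def pvField (r : List (String × String)) (k : String) : String :=
  PySem.Dict.getD (PySem.Dict.mk r) k ""

-- search_text construction: these lines are identical in A and B, so the helper is shared.
def pvSearchText (recommended_stack : Option (List (String × String))) (project_description : Option String) : String :=
  let t :=
    match recommended_stack with
    | some d => if d ≠ [] then PySem.Str.lower (PySem.Str.join " " (PySem.Dict.ofList d).values) else ""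
    | none => ""
  match project_description with
  | some s => if s ≠ "" then t ++ " " ++ PySem.Str.lower s else t
  | none => t

-- A's dedup loop body (seen_slugs, recommendations)
def pvIStepA (st : PySem.Set String × List (List (String × String))) (rec : List (String × String)) :
    PySem.Set String × List (List (String × String)) :=
  if PySem.Set.contains st.1 (pvField rec "slug") then st
  else (PySem.Set.add st.1 (pvField rec "slug"), st.2 ++ [rec])

def pvStepA (t : String) (st : PySem.Set String × List (List (String × String)))
    (kv : String × List (List (String × String))) :
    PySem.Set String × List (List (String × String)) :=
  if PySem.Str.isIn kv.1 t then kv.2.foldl pvIStepA st else st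

def recommend_connectors (recommended_stack : Option (List (String × String))) (project_description : Option String) : List (List (String × String)) :=
  let search_text := pvSearchText recommended_stack project_description
  let st := pvStackConnectorMap.foldl (pvStepA search_text) (PySem.Set.empty, [])
  PySem.List.sorted st.2
    (fun r => PySem.Dict.getD
      (PySem.Dict.mk [("required", (0 : Int)), ("recommended", 1), ("optional", 2)])
      (pvField r "priority") 3)

-- ===== PORT B =====
-- B's loop body: (seen_slugs, required, recommended, optional); buckets[rec["priority"]].append(rec).
-- The final else is the "optional" bucket: for the constant map the priority is always one of the three.
def pvIStepB (st : PySem.Set String × List (List (String × String)) × List (List (String × String)) × List (List (String × String)))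
    (rec : List (String × String)) :
    PySem.Set String × List (List (String × String)) × List (List (String × String)) × List (List (String × String)) :=
  if PySem.Set.contains st.1 (pvField rec "slug") then st
  else
    (PySem.Set.add st.1 (pvField rec "slug"),
     if pvField rec "priority" == "required" then (st.2.1 ++ [rec], st.2.2.1, st.2.2.2)
     else if pvField rec "priority" == "recommended" then (st.2.1, st.2.2.1 ++ [rec], st.2.2.2)
     else (st.2.1, st.2.2.1, st.2.2.2 ++ [rec]))

def pvStepB (t : String)
    (st : PySem.Set String × List (List (String × String)) × List (List (String × String)) × List (List (String × String)))
    (kv : String × List (List (String × String))) :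
    PySem.Set String × List (List (String × String)) × List (List (String × String)) × List (List (String × String)) :=
  if PySem.Str.isIn kv.1 t then kv.2.foldl pvIStepB st else st

def recommend_connectors_alt (recommended_stack : Option (List (String × String))) (project_description : Option String) : List (List (String × String)) :=
  let search_text := pvSearchText recommended_stack project_description
  let st := pvStackConnectorMap.foldl (pvStepB search_text) (PySem.Set.empty, ([], [], []))
  st.2.1 ++ st.2.2.1 ++ st.2.2.2

-- ===== PRECONDITION & SPEC =====
def Spec_recommend_connectors (recommended_stack : Option (List (String × String))) (project_description : Option String) (out : List (List (String × String))) : Prop := out = recommend_connectors_alt recommended_stack project_description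
instance (recommended_stack : Option (List (String × String))) (project_description : Option String) (out : List (List (String × String))) : Decidable (Spec_recommend_connectors recommended_stack project_description out) := by unfold Spec_recommend_connectors; infer_instance

-- ===== CLAIM (what is proved, stated in full; the proofs are below) =====
def Claim_equal_recommend_connectors : Prop := ∀ (recommended_stack : Option (List (String × String))) (project_description : Option String), Dom_recommend_connectors recommended_stack project_description → Spec_recommend_connectors recommended_stack project_description (recommend_connectors recommended_stack project_description)

-- ===== LEMMAS AND PROOFS =====

-- A's sort key as a named function (definitionally the lambda in port A)
def pvKey (r : List (String × String)) : Int :=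
  PySem.Dict.getD (PySem.Dict.mk [("required", (0 : Int)), ("recommended", 1), ("optional", 2)])
    (pvField r "priority") 3

def pvValid (r : List (String × String)) : Prop :=
  pvField r "priority" = "required" ∨ pvField r "priority" = "recommended" ∨ pvField r "priority" = "optional"

-- bucket membership tests used by B
def pvQ0 (r : List (String × String)) : Bool := pvField r "priority" == "required"
def pvQ1 (r : List (String × String)) : Bool := pvField r "priority" == "recommended"
def pvQ2 (r : List (String × String)) : Bool := !(pvQ0 r) && !(pvQ1 r)

lemma pvKey_eq (r : List (String × String)) (p : String) (h : pvField r "priority" = p) :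
    pvKey r = PySem.Dict.getD (PySem.Dict.mk [("required", (0 : Int)), ("recommended", 1), ("optional", 2)]) p 3 := by
  simp only [pvKey, h]

lemma pvKey_mem_of_valid (r : List (String × String)) (h : pvValid r) :
    pvKey r = 0 ∨ pvKey r = 1 ∨ pvKey r = 2 := by
  rcases h with h | h | h
  · exact Or.inl (by rw [pvKey_eq r _ h]; decide)
  · exact Or.inr (Or.inl (by rw [pvKey_eq r _ h]; decide))
  · exact Or.inr (Or.inr (by rw [pvKey_eq r _ h]; decide))

-- insertBy passes over a block it does not insert before
lemma pvInsertBy_skip {α : Type} (before : α → α → Bool) (x : α) (l1 l2 : List α)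
    (h : ∀ y ∈ l1, before x y = false) :
    PySem.List.insertBy before x (l1 ++ l2) = l1 ++ PySem.List.insertBy before x l2 := by
  induction l1 with
  | nil => simp
  | cons y ys ih =>
      simp only [List.cons_append, PySem.List.insertBy, h y (List.mem_cons_self), Bool.false_eq_true,
        if_false]
      exact congrArg (y :: ·) (ih fun z hz => h z (List.mem_cons_of_mem _ hz))

-- insertBy lands in front of a block it must precede entirely
lemma pvInsertBy_front {α : Type} (before : α → α → Bool) (x : α) (l : List α)
    (h : ∀ y ∈ l, before x y = true) :
    PySem.List.insertBy before x l = x :: l := by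
  cases l with
  | nil => simp [PySem.List.insertBy]
  | cons y ys => simp [PySem.List.insertBy, h y (List.mem_cons_self)]

-- the stable sort by a {0,1,2}-valued key is the concatenation of the three key-buckets
lemma pvSort3 (key : List (String × String) → Int) (L : List (List (String × String)))
    (h : ∀ r ∈ L, key r = 0 ∨ key r = 1 ∨ key r = 2) :
    PySem.List.sorted L key =
      L.filter (fun r => key r == 0) ++ L.filter (fun r => key r == 1) ++ L.filter (fun r => key r == 2) := by
  induction L using List.reverseRecOn with
  | nil => rw [PySem.List.sorted_eq_foldl_insertBy]; simp
  | append_singleton L x ih =>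
      have hx := h x (by simp)
      have hL : ∀ r ∈ L, key r = 0 ∨ key r = 1 ∨ key r = 2 := fun r hr => h r (by simp [hr])
      rw [PySem.List.sorted_eq_foldl_insertBy, List.foldl_append, ← PySem.List.sorted_eq_foldl_insertBy,
        ih hL, List.foldl_cons, List.foldl_nil]
      have mem0 : ∀ y ∈ L.filter (fun r => key r == 0), key y = 0 := by
        intro y hy; have := (List.mem_filter.1 hy).2; simpa using this
      have mem1 : ∀ y ∈ L.filter (fun r => key r == 1), key y = 1 := by
        intro y hy; have := (List.mem_filter.1 hy).2; simpa using this
      have mem2 : ∀ y ∈ L.filter (fun r => key r == 2), key y = 2 := by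
        intro y hy; have := (List.mem_filter.1 hy).2; simpa using this
      rcases hx with hx | hx | hx
      · rw [List.append_assoc,
          pvInsertBy_skip _ x _ _ (fun y hy => by simp [hx, mem0 y hy]),
          pvInsertBy_front _ x _ (fun y hy => by
            rcases List.mem_append.1 hy with hy | hy
            · simp [hx, mem1 y hy]
            · simp [hx, mem2 y hy])]
        simp [List.filter_append, hx]
      · rw [List.append_assoc, List.append_assoc,
          pvInsertBy_skip _ x _ _ (fun y hy => by simp [hx, mem0 y hy]),
          pvInsertBy_skip _ x _ _ (fun y hy => by simp [hx, mem1 y hy]),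
          pvInsertBy_front _ x _ (fun y hy => by simp [hx, mem2 y hy])]
        simp [List.filter_append, hx]
      · rw [PySem.List.insertBy_of_forall_not_before _ x _ (fun y hy => by
          rcases List.mem_append.1 hy with hy | hy
          · rcases List.mem_append.1 hy with hy | hy
            · simp [hx, mem0 y hy]
            · simp [hx, mem1 y hy]
          · simp [hx, mem2 y hy])]
        simp [List.filter_append, hx]

-- every recommendation A accumulates carries one of the three priorities
lemma pvInnerValid (recs : List (List (String × String))) (hrecs : ∀ r ∈ recs, pvValid r)
    (st : PySem.Set String × List (List (String × String))) (hst : ∀ r ∈ st.2, pvValid r) :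
    ∀ r ∈ (recs.foldl pvIStepA st).2, pvValid r := by
  induction recs generalizing st with
  | nil => exact hst
  | cons a t ih =>
      refine ih (fun r hr => hrecs r (List.mem_cons_of_mem _ hr)) _ ?_
      unfold pvIStepA
      split
      · exact hst
      · intro r hr
        rcases List.mem_append.1 hr with hr | hr
        · exact hst r hr
        · simp only [List.mem_singleton] at hr
          exact hr ▸ hrecs a List.mem_cons_self

lemma pvOuterValid (m : List (String × List (List (String × String))))
    (hm : ∀ kv ∈ m, ∀ r ∈ kv.2, pvValid r) (t : String)
    (st : PySem.Set String × List (List (String × String))) (hst : ∀ r ∈ st.2, pvValid r) :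
    ∀ r ∈ (m.foldl (pvStepA t) st).2, pvValid r := by
  induction m generalizing st with
  | nil => exact hst
  | cons kv rest ih =>
      refine ih (fun kv' h' => hm kv' (List.mem_cons_of_mem _ h')) _ ?_
      unfold pvStepA
      split
      · exact pvInnerValid kv.2 (hm kv List.mem_cons_self) st hst
      · exact hst

-- B's inner loop keeps the three buckets equal to the three priority-filters of A's list
lemma pvInnerEq (recs : List (List (String × String))) (hrecs : ∀ r ∈ recs, pvValid r)
    (s : PySem.Set String) (L : List (List (String × String))) :
    recs.foldl pvIStepB (s, L.filter pvQ0, L.filter pvQ1, L.filter pvQ2) =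
      ((recs.foldl pvIStepA (s, L)).1,
       (recs.foldl pvIStepA (s, L)).2.filter pvQ0,
       (recs.foldl pvIStepA (s, L)).2.filter pvQ1,
       (recs.foldl pvIStepA (s, L)).2.filter pvQ2) := by
  induction recs generalizing s L with
  | nil => rfl
  | cons a t ih =>
      have ha := hrecs a List.mem_cons_self
      have ht : ∀ r ∈ t, pvValid r := fun r hr => hrecs r (List.mem_cons_of_mem _ hr)
      simp only [List.foldl_cons]
      by_cases hc : PySem.Set.contains s (pvField a "slug") = true
      · have hA : pvIStepA (s, L) a = (s, L) := by unfold pvIStepA; rw [if_pos hc]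
        have hB : pvIStepB (s, L.filter pvQ0, L.filter pvQ1, L.filter pvQ2) a =
            (s, L.filter pvQ0, L.filter pvQ1, L.filter pvQ2) := by unfold pvIStepB; rw [if_pos hc]
        rw [hA, hB, ih ht]
      · have hA : pvIStepA (s, L) a =
            (PySem.Set.add s (pvField a "slug"), L ++ [a]) := by unfold pvIStepA; rw [if_neg hc]
        have hB : pvIStepB (s, L.filter pvQ0, L.filter pvQ1, L.filter pvQ2) a =
            (PySem.Set.add s (pvField a "slug"),
             (L ++ [a]).filter pvQ0, (L ++ [a]).filter pvQ1, (L ++ [a]).filter pvQ2) := by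
          unfold pvIStepB
          rw [if_neg hc]
          rcases ha with hp | hp | hp <;>
            simp [hp, List.filter_append, pvQ0, pvQ1, pvQ2]
        rw [hA, hB, ih ht]

lemma pvOuterEq (m : List (String × List (List (String × String))))
    (hm : ∀ kv ∈ m, ∀ r ∈ kv.2, pvValid r) (t : String)
    (s : PySem.Set String) (L : List (List (String × String))) :
    m.foldl (pvStepB t) (s, L.filter pvQ0, L.filter pvQ1, L.filter pvQ2) =
      ((m.foldl (pvStepA t) (s, L)).1,
       (m.foldl (pvStepA t) (s, L)).2.filter pvQ0,
       (m.foldl (pvStepA t) (s, L)).2.filter pvQ1,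
       (m.foldl (pvStepA t) (s, L)).2.filter pvQ2) := by
  induction m generalizing s L with
  | nil => rfl
  | cons kv rest ih =>
      have hrest : ∀ kv' ∈ rest, ∀ r ∈ kv'.2, pvValid r :=
        fun kv' h' => hm kv' (List.mem_cons_of_mem _ h')
      simp only [List.foldl_cons]
      by_cases hin : PySem.Str.isIn kv.1 t = true
      · have hA : pvStepA t (s, L) kv = kv.2.foldl pvIStepA (s, L) := by
          unfold pvStepA; rw [if_pos hin]
        have hB : pvStepB t (s, L.filter pvQ0, L.filter pvQ1, L.filter pvQ2) kv =
            kv.2.foldl pvIStepB (s, L.filter pvQ0, L.filter pvQ1, L.filter pvQ2) := by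
          unfold pvStepB; rw [if_pos hin]
        rw [hA, hB, pvInnerEq kv.2 (hm kv List.mem_cons_self) s L]
        have := ih hrest ((kv.2.foldl pvIStepA (s, L)).1) ((kv.2.foldl pvIStepA (s, L)).2)
        simpa using this
      · have hA : pvStepA t (s, L) kv = (s, L) := by unfold pvStepA; rw [if_neg hin]
        have hB : pvStepB t (s, L.filter pvQ0, L.filter pvQ1, L.filter pvQ2) kv =
            (s, L.filter pvQ0, L.filter pvQ1, L.filter pvQ2) := by unfold pvStepB; rw [if_neg hin]
        rw [hA, hB, ih hrest s L]

lemma pvMapValid : ∀ kv ∈ pvStackConnectorMap, ∀ r ∈ kv.2, pvValid r := by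
  simp only [pvValid]; decide

-- the key-filters coincide with B's bucket tests on valid records
lemma pvFilter_congr (L : List (List (String × String))) (hL : ∀ r ∈ L, pvValid r) :
    L.filter (fun r => pvKey r == 0) = L.filter pvQ0 ∧
    L.filter (fun r => pvKey r == 1) = L.filter pvQ1 ∧
    L.filter (fun r => pvKey r == 2) = L.filter pvQ2 := by
  refine ⟨List.filter_congr ?_, List.filter_congr ?_, List.filter_congr ?_⟩ <;>
    intro r hr <;>
    rcases hL r hr with hp | hp | hp <;>
    rw [pvKey_eq r _ hp] <;> simp [pvQ0, pvQ1, pvQ2, hp] <;> decide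

lemma pvCore (t : String) :
    PySem.List.sorted (pvStackConnectorMap.foldl (pvStepA t) (PySem.Set.empty, [])).2
      (fun r => PySem.Dict.getD
        (PySem.Dict.mk [("required", (0 : Int)), ("recommended", 1), ("optional", 2)])
        (pvField r "priority") 3) =
      (pvStackConnectorMap.foldl (pvStepB t) (PySem.Set.empty, ([], [], []))).2.1 ++
      (pvStackConnectorMap.foldl (pvStepB t) (PySem.Set.empty, ([], [], []))).2.2.1 ++
      (pvStackConnectorMap.foldl (pvStepB t) (PySem.Set.empty, ([], [], []))).2.2.2 := by
  have hB := pvOuterEq pvStackConnectorMap pvMapValid t PySem.Set.empty []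
  have hv : ∀ r ∈ (pvStackConnectorMap.foldl (pvStepA t) (PySem.Set.empty, [])).2, pvValid r :=
    pvOuterValid pvStackConnectorMap pvMapValid t _ (by intro r hr; simp at hr)
  have hfilters := pvFilter_congr _ hv
  have hsort := pvSort3 pvKey _ (fun r hr => pvKey_mem_of_valid r (hv r hr))
  show PySem.List.sorted (pvStackConnectorMap.foldl (pvStepA t) (PySem.Set.empty, [])).2 pvKey = _
  rw [hsort, hfilters.1, hfilters.2.1, hfilters.2.2]
  have : (PySem.Set.empty, ([], [], [])) =
      ((PySem.Set.empty : PySem.Set String),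
       (([] : List (List (String × String))).filter pvQ0,
        ([] : List (List (String × String))).filter pvQ1,
        ([] : List (List (String × String))).filter pvQ2)) := rfl
  rw [this, hB]

-- ===== VERDICT (by name: the statement is the Claim_ definition above) =====
theorem recommend_connectors_spec : Claim_equal_recommend_connectors := by
  intro rs pd _
  show recommend_connectors rs pd = recommend_connectors_alt rs pd
  exact pvCore (pvSearchText rs pd)
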